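-- pv_equiv track=rewrite | github.com/SmarterApp/RDW_DataWarehouse | smarter/smarter/database/datasource.py | parse_db_settings
-- ===== SOURCE A (Python) =====
-- def parse_db_settings(settings):
--     '''
--     Returns a tuple of a list of tenants and a dictionary of tenant specfic options
--     '''
--     options = {}
--     tenants = []
--     tenant_options = {}
--     # Get all the generic edware db configurations
--     for key, val in settings.items():
--         if key.startswith('edware.db.'):
--             options[key[10:]] = val
--             # tenants have unique URL, extract tenant name based on url
--             if key.endswith('.url'):
--                 index = len(key) - 4
--                 tenant = key[10:index]
--                 tenants.append(tenant)
--     # Merge with tenant specific configurations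
--     for tenant in tenants:
--         prefix = get_db_config_prefix(tenant)
--         for key, val in options.items():
--             # if it's a tenant specific config, there will be a period in the key
--             formatted = key.find('.')
--             new_key = key
--             if formatted > 0:
--                 new_key = key[0:formatted]
--             if new_key == tenant:
--                 # it's a tenant specific config
--                 tenant_options[prefix + key[(formatted + 1):]] = val
--             elif new_key not in tenants and options.get(tenant + '.' + new_key) is None:
--                 # it's not a tenant specific and we're not looking at a config of another tenant
--                 tenant_options[prefix + new_key] = val
--
--     return tenants, tenant_options
--
-- def get_db_config_prefix(tenant):
--     '''
--     Returns the prefix for a tenantmore  for sqlalchemy db configuration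
--     '''
--     return 'edware.db.' + tenant + "."
-- ===== SOURCE B (Python) =====
-- def parse_db_settings(settings):
--     '''
--     Returns a tuple of a list of tenants and a dictionary of tenant specfic options
--     '''
--     options = {}
--     tenants = []
--     for key, val in settings.items():
--         if key.startswith('edware.db.'):
--             options[key[10:]] = val
--             if key.endswith('.url'):
--                 tenants.append(key[10:len(key) - 4])
--     # Single pass over the options: route each entry into a per-tenant bucket,
--     # then lay the buckets out tenant by tenant.
--     buckets = {t: [] for t in tenants}
--     for key, val in options.items():
--         i = key.find('.')
--         base = key[0:i] if i > 0 else key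
--         rest = key[i + 1:]
--         if base in buckets:
--             buckets[base].append(('edware.db.' + base + '.' + rest, val))
--         else:
--             for t in tenants:
--                 if options.get(t + '.' + base) is None:
--                     buckets[t].append(('edware.db.' + t + '.' + base, val))
--     tenant_options = {}
--     for t in tenants:
--         for k, v in buckets[t]:
--             tenant_options[k] = v
--     return tenants, tenant_options
-- ===== Notes on version B (the rewrite author's own statement) =====
-- stated objective: alternative
-- what changed: A rescans the whole options dict once per tenant, re-splitting every key and deciding per (tenant, key) pair; B makes a single routing pass over the options that splits each key once and distributes each entry into per-tenant buckets (tenant-specific entries to their one tenant, generic entries to every tenant without an override), then lays the buckets out tenant by tenant.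
import Mathlib
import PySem

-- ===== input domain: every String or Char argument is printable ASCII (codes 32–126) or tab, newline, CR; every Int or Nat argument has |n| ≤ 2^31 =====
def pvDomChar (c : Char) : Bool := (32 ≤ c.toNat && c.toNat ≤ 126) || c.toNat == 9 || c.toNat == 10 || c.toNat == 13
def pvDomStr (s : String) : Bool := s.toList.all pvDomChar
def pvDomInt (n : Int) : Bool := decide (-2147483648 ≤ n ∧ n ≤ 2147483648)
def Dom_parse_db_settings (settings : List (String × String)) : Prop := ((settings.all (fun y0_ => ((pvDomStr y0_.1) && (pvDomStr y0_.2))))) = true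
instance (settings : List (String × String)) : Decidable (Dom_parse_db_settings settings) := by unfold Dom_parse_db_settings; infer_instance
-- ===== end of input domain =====

-- B replaces A's tenant-by-tenant rescan of the options dict with a single routing
-- pass over the options that distributes each entry into per-tenant buckets
-- (objective: alternative decomposition, same asymptotic cost).

-- ===== PORT A =====
-- phase 1 (identical in Source A and Source B): collect 'edware.db.'-prefixed options and the tenants
def pvPhase1 (settings : List (String × String)) : PySem.Dict String String × List String :=
  (PySem.Dict.ofList settings).items.foldl (fun st kv =>
    if PySem.Str.startswith kv.1 "edware.db." then
      let options := st.1.insert (PySem.Str.slice kv.1 (some 10) none) kv.2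
      if PySem.Str.endswith kv.1 ".url" then
        (options, st.2 ++ [PySem.Str.slice kv.1 (some 10) (some (PySem.Str.len kv.1 - 4))])
      else (options, st.2)
    else st) (PySem.Dict.empty, [])

def get_db_config_prefix (tenant : String) : String := "edware.db." ++ tenant ++ "."

-- body of A's inner loop over options.items() for a fixed tenant
def pvAStep (options : PySem.Dict String String) (tenants : List String) (tenant : String)
    (prefix_ : String) (d : PySem.Dict String String) (kv : String × String) :
    PySem.Dict String String :=
  let key := kv.1
  let formatted := PySem.Str.find key "."
  let new_key := if formatted > 0 then PySem.Str.slice key (some 0) (some formatted) else key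
  if new_key == tenant then
    d.insert (prefix_ ++ PySem.Str.slice key (some (formatted + 1)) none) kv.2
  else if !(tenants.contains new_key) && (options.get? (tenant ++ "." ++ new_key)).isNone then
    d.insert (prefix_ ++ new_key) kv.2
  else d

def parse_db_settings (settings : List (String × String)) : List String × (List (String × String)) :=
  let p := pvPhase1 settings
  let options := p.1
  let tenants := p.2
  let tenant_options := tenants.foldl (fun d tenant =>
      let prefix_ := get_db_config_prefix tenant
      options.items.foldl (pvAStep options tenants tenant prefix_) d) PySem.Dict.empty
  (tenants, tenant_options.items)

-- ===== PORT B =====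
-- body of B's inner loop routing a generic option into every tenant bucket it applies to
def pvBGenStep (options : PySem.Dict String String) (base v : String)
    (b : PySem.Dict String (List (String × String))) (t : String) :
    PySem.Dict String (List (String × String)) :=
  if (options.get? (t ++ "." ++ base)).isNone then
    b.modify t [] (fun l => l ++ [("edware.db." ++ t ++ "." ++ base, v)])
  else b

-- body of B's single routing pass over options.items()
def pvBOptStep (options : PySem.Dict String String) (tenants : List String)
    (b : PySem.Dict String (List (String × String))) (kv : String × String) :
    PySem.Dict String (List (String × String)) :=
  let key := kv.1
  let i := PySem.Str.find key "."
  let base := if i > 0 then PySem.Str.slice key (some 0) (some i) else key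
  let rest := PySem.Str.slice key (some (i + 1)) none
  if b.contains base then
    b.modify base [] (fun l => l ++ [("edware.db." ++ base ++ "." ++ rest, kv.2)])
  else
    tenants.foldl (pvBGenStep options base kv.2) b

def parse_db_settings_alt (settings : List (String × String)) : List String × (List (String × String)) :=
  let p := pvPhase1 settings
  let options := p.1
  let tenants := p.2
  let buckets0 := tenants.foldl (fun b t => b.insert t ([] : List (String × String))) PySem.Dict.empty
  let buckets := options.items.foldl (pvBOptStep options tenants) buckets0
  let tenant_options := tenants.foldl (fun d t =>
      (buckets.getD t []).foldl (fun d p => d.insert p.1 p.2) d) PySem.Dict.empty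
  (tenants, tenant_options.items)

-- ===== PRECONDITION & SPEC =====
def Spec_parse_db_settings (settings : List (String × String)) (out : List String × (List (String × String))) : Prop := out = parse_db_settings_alt settings
instance (settings : List (String × String)) (out : List String × (List (String × String))) : Decidable (Spec_parse_db_settings settings out) := by unfold Spec_parse_db_settings; infer_instance

-- ===== CLAIM (what is proved, stated in full; the proofs are below) =====
def Claim_equal_parse_db_settings : Prop := ∀ (settings : List (String × String)), Dom_parse_db_settings settings → Spec_parse_db_settings settings (parse_db_settings settings)

-- ===== LEMMAS AND PROOFS =====

def pvIns (d : PySem.Dict String String) (p : String × String) : PySem.Dict String String :=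
  d.insert p.1 p.2

def pvBase (key : String) : String :=
  if PySem.Str.find key "." > 0 then PySem.Str.slice key (some 0) (some (PySem.Str.find key ".")) else key

def pvRest (key : String) : String :=
  PySem.Str.slice key (some (PySem.Str.find key "." + 1)) none

-- the insertions A's inner loop performs for one tenant, as a list
def pvEmitOne (options : PySem.Dict String String) (tenants : List String) (t : String)
    (kv : String × String) : List (String × String) :=
  if pvBase kv.1 == t then [(get_db_config_prefix t ++ pvRest kv.1, kv.2)]
  else if !(tenants.contains (pvBase kv.1)) && (options.get? (t ++ "." ++ pvBase kv.1)).isNone then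
    [(get_db_config_prefix t ++ pvBase kv.1, kv.2)]
  else []

-- the entries B's routing pass puts into tenant t's bucket for one option entry
def pvBlock (options : PySem.Dict String String) (tenants : List String) (t : String)
    (kv : String × String) : List (String × String) :=
  if tenants.contains (pvBase kv.1) then
    (if pvBase kv.1 == t then [(get_db_config_prefix (pvBase kv.1) ++ pvRest kv.1, kv.2)] else [])
  else if (options.get? (t ++ "." ++ pvBase kv.1)).isNone then
    List.replicate (tenants.count t) (get_db_config_prefix t ++ pvBase kv.1, kv.2)
  else []

-- a loop whose every step is a block of inserts is the fold of inserts over the flattened blocks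
lemma pv_foldl_blocks {α : Type} (g : α → List (String × String))
    (step : PySem.Dict String String → α → PySem.Dict String String)
    (h : ∀ d x, step d x = (g x).foldl pvIns d) :
    ∀ (l : List α) (d : PySem.Dict String String),
      l.foldl step d = (l.flatMap g).foldl pvIns d := by
  intro l
  induction l with
  | nil => intro d; simp
  | cons x l ih => intro d; simp [List.foldl_append, h, ih]

lemma pv_astep_blocks (options : PySem.Dict String String) (tenants : List String) (t : String)
    (d : PySem.Dict String String) (kv : String × String) :
    pvAStep options tenants t (get_db_config_prefix t) d kv = (pvEmitOne options tenants t kv).foldl pvIns d := by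
  simp only [pvAStep, pvEmitOne, pvBase, pvRest]
  split_ifs with h1 h2 <;> simp [pvIns]

lemma pv_gen_fold (options : PySem.Dict String String) (base v : String) :
    ∀ (l : List String) (b : PySem.Dict String (List (String × String))) (t : String),
      (l.foldl (pvBGenStep options base v) b).getD t [] =
        b.getD t [] ++ (if (options.get? (t ++ "." ++ base)).isNone then
          List.replicate (l.count t) (("edware.db." ++ t ++ "." ++ base : String), v) else []) := by
  intro l
  induction l with
  | nil => intro b t; simp
  | cons t' l ih =>
    intro b t
    rw [List.foldl_cons, ih]
    by_cases hts : t = t'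
    · subst hts
      unfold pvBGenStep
      split_ifs with hc
      · rw [PySem.Dict.getD_modify_self]
        simp only [List.count_cons_self, List.append_assoc, List.singleton_append,
          ← List.replicate_succ]
      · simp
    · have h1 : (pvBGenStep options base v b t').getD t [] = b.getD t [] := by
        unfold pvBGenStep
        split_ifs with hc
        · exact PySem.Dict.getD_modify_of_ne _ _ _ hts
        · rfl
      rw [h1]
      simp [Ne.symm hts]

lemma pvBOptStep_eq (options : PySem.Dict String String) (tenants : List String)
    (b : PySem.Dict String (List (String × String))) (kv : String × String) :
    pvBOptStep options tenants b kv =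
      if b.contains (pvBase kv.1) then
        b.modify (pvBase kv.1) [] (fun l => l ++ [(get_db_config_prefix (pvBase kv.1) ++ pvRest kv.1, kv.2)])
      else tenants.foldl (pvBGenStep options (pvBase kv.1) kv.2) b := rfl

lemma pv_gen_contains (options : PySem.Dict String String) (base v : String) (tenants : List String) :
    ∀ (l : List String) (b : PySem.Dict String (List (String × String))),
      (∀ t' ∈ l, tenants.contains t' = true) →
      (∀ s, b.contains s = tenants.contains s) →
      ∀ s, (l.foldl (pvBGenStep options base v) b).contains s = tenants.contains s := by
  intro l
  induction l with
  | nil => intro b _ hb s; exact hb s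
  | cons t' l ih =>
    intro b hl hb s
    refine ih _ (fun u hu => hl u (List.mem_cons_of_mem _ hu)) ?_ s
    intro u
    unfold pvBGenStep
    split_ifs with hc
    · rw [PySem.Dict.contains_modify]
      by_cases hu' : u = t'
      · subst hu'
        have hm := hl u (List.mem_cons_self ..)
        simp only [BEq.rfl, Bool.true_or, hm]
      · simp [hu', hb u]
    · exact hb u

lemma pv_opt_contains (options : PySem.Dict String String) (tenants : List String)
    (b : PySem.Dict String (List (String × String))) (kv : String × String)
    (hb : ∀ s, b.contains s = tenants.contains s) :
    ∀ s, (pvBOptStep options tenants b kv).contains s = tenants.contains s := by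
  intro s
  rw [pvBOptStep_eq]
  by_cases hc : b.contains (pvBase kv.1) = true
  · rw [if_pos hc, PySem.Dict.contains_modify]
    by_cases hs : s = pvBase kv.1
    · rw [hb] at hc
      simp only [hs, BEq.rfl, Bool.true_or, hc]
    · simp [hs, hb s]
  · rw [if_neg hc]
    exact pv_gen_contains options _ kv.2 tenants tenants b
      (fun t' ht' => List.elem_eq_true_of_mem ht') hb s

lemma pv_bucket (options : PySem.Dict String String) (tenants : List String) (t : String) :
    ∀ (items : List (String × String)) (b : PySem.Dict String (List (String × String))),
      (∀ s, b.contains s = tenants.contains s) →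
      (items.foldl (pvBOptStep options tenants) b).getD t [] =
        b.getD t [] ++ items.flatMap (pvBlock options tenants t) := by
  intro items
  induction items with
  | nil => intro b _; simp
  | cons kv items ih =>
    intro b hb
    rw [List.foldl_cons, ih _ (pv_opt_contains _ _ _ _ hb), List.flatMap_cons, ← List.append_assoc]
    have hstep : (pvBOptStep options tenants b kv).getD t [] = b.getD t [] ++ pvBlock options tenants t kv := by
      rw [pvBOptStep_eq]
      simp only [pvBlock]
      by_cases hc : b.contains (pvBase kv.1) = true
      · have hc' : tenants.contains (pvBase kv.1) = true := by rw [← hb]; exact hc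
        rw [if_pos hc, if_pos hc', PySem.Dict.getD_modify]
        by_cases hbt : t = pvBase kv.1
        · rw [if_pos hbt, if_pos (beq_iff_eq.mpr hbt.symm), hbt]
        · rw [if_neg hbt, if_neg (fun h => hbt (eq_of_beq h).symm), List.append_nil]
      · have hc' : ¬ tenants.contains (pvBase kv.1) = true := by rw [← hb]; exact hc
        rw [if_neg hc, if_neg hc']
        exact pv_gen_fold options (pvBase kv.1) kv.2 tenants b t
    rw [hstep]

lemma pv_buckets0_contains (tenants : List String) (s : String) :
    (tenants.foldl (fun b t => b.insert t ([] : List (String × String))) PySem.Dict.empty).contains s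
      = tenants.contains s := by
  rw [Bool.eq_iff_iff, PySem.Dict.contains_iff_mem_keys,
    PySem.Dict.keys_foldl_insert (f := fun _ _ => ([] : List (String × String)))]
  simp [PySem.Set.mem_update]

lemma pv_buckets0_getD :
    ∀ (l : List String) (b : PySem.Dict String (List (String × String))) (t : String),
      b.getD t [] = [] →
      (l.foldl (fun b t => b.insert t ([] : List (String × String))) b).getD t [] = [] := by
  intro l
  induction l with
  | nil => intro b t h; simpa using h
  | cons x l ih =>
    intro b t h
    refine ih _ _ ?_
    rw [PySem.Dict.getD_insert]
    split <;> simp [h]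

lemma pv_repl_fold (e : String × String) :
    ∀ (c : Nat) (d : PySem.Dict String String), 0 < c →
      (List.replicate c e).foldl pvIns d = d.insert e.1 e.2 := by
  intro c
  induction c with
  | zero => intro d h; exact absurd h (by omega)
  | succ c ih =>
    intro d _
    rcases Nat.eq_zero_or_pos c with h | h
    · subst h; simp [pvIns]
    · simp only [List.replicate_succ, List.foldl_cons, ih _ h, pvIns, PySem.Dict.insert_insert_self]

lemma pv_block_fold (options : PySem.Dict String String) (tenants : List String) (t : String)
    (ht : t ∈ tenants) (kv : String × String) (d : PySem.Dict String String) :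
    (pvBlock options tenants t kv).foldl pvIns d = (pvEmitOne options tenants t kv).foldl pvIns d := by
  simp only [pvBlock, pvEmitOne]
  by_cases hc : tenants.contains (pvBase kv.1) = true
  · rw [if_pos hc]
    by_cases hbt : (pvBase kv.1 == t) = true
    · rw [if_pos hbt, if_pos hbt, eq_of_beq hbt]
    · rw [if_neg hbt, if_neg hbt, if_neg (by simp [List.mem_of_elem_eq_true hc])]
  · rw [if_neg hc]
    have hne : ¬ (pvBase kv.1 == t) = true :=
      fun h => hc (by rw [eq_of_beq h]; exact List.elem_eq_true_of_mem ht)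
    rw [if_neg hne]
    by_cases hn : (options.get? (t ++ "." ++ pvBase kv.1)).isNone = true
    · have hcf : tenants.contains (pvBase kv.1) = false := Bool.not_eq_true _ ▸ eq_false_of_ne_true hc
      rw [if_pos hn, if_pos (by simp [hn]; exact fun h => hc (List.elem_eq_true_of_mem h)), pv_repl_fold _ _ _ (List.count_pos_iff.mpr ht)]
      rfl
    · rw [if_neg hn, if_neg (by simp [hn])]

theorem pv_main (options : PySem.Dict String String) (tenants : List String) :
    tenants.foldl (fun d tenant =>
      let prefix_ := get_db_config_prefix tenant
      options.items.foldl (pvAStep options tenants tenant prefix_) d) PySem.Dict.empty =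
    tenants.foldl (fun d t =>
      (((options.items.foldl (pvBOptStep options tenants)
          (tenants.foldl (fun b t => b.insert t ([] : List (String × String))) PySem.Dict.empty))).getD t []).foldl
        (fun d p => d.insert p.1 p.2) d) PySem.Dict.empty := by
  refine PySem.List.foldl_congr_mem tenants _ _ _ ?_
  intro acc t ht
  show options.items.foldl (pvAStep options tenants t (get_db_config_prefix t)) acc = _
  rw [pv_foldl_blocks (pvEmitOne options tenants t) _ (fun d kv => pv_astep_blocks options tenants t d kv),
    pv_bucket options tenants t options.items _ (fun s => pv_buckets0_contains tenants s),
    pv_buckets0_getD tenants _ t (by simp), List.nil_append]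
  rw [show (fun (d : PySem.Dict String String) (p : String × String) => d.insert p.1 p.2) = pvIns from rfl]
  rw [← pv_foldl_blocks (pvBlock options tenants t) (fun d kv => (pvBlock options tenants t kv).foldl pvIns d) (fun _ _ => rfl),
    ← pv_foldl_blocks (pvEmitOne options tenants t) (fun d kv => (pvEmitOne options tenants t kv).foldl pvIns d) (fun _ _ => rfl)]
  exact PySem.List.foldl_congr_mem options.items _ _ acc
    (fun acc' kv _ => (pv_block_fold options tenants t ht kv acc').symm)

-- ===== VERDICT (by name: the statement is the Claim_ definition above) =====
theorem parse_db_settings_spec : Claim_equal_parse_db_settings := by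
  intro settings _
  unfold Spec_parse_db_settings parse_db_settings parse_db_settings_alt
  exact congrArg (fun d => ((pvPhase1 settings).2, PySem.Dict.items d)) (pv_main (pvPhase1 settings).1 (pvPhase1 settings).2)
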